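-- pv_equiv track=rewrite | github.com/buehlere/Genomics | py4Genom/Final/ORF2.py | freq_repeats
-- ===== SOURCE A (Python) =====
-- def find_repeats(seqs, n):
--     all_repeats = []
--     for key, value in seqs.items():
--         seq = value
--         repeats = []
--         for i in range(0,len(seq),1):
--             snip = seq[i:i+n]
--             if len(snip) == n:
--                 repeats.append(snip)
--         for j in repeats:
--             all_repeats.append(j)
--     return(all_repeats)
--
-- def freq_repeats(seqs, n):
--     repeat_dict = {}
--     all_repeats = find_repeats(seqs, n)
--     for i in range(0,len(all_repeats),1):
--         if all_repeats[i] not in repeat_dict: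
--             for j in range(i+1,len(all_repeats),1):
--                 if all_repeats[i] == all_repeats[j]:
--                     if all_repeats[i] not in repeat_dict:
--                         repeat_dict.update({all_repeats[i]:2})
--                     else:
--                         repeat_dict[all_repeats[i]] += 1
--     return(repeat_dict)
-- ===== SOURCE B (Python) =====
-- def freq_repeats(seqs, n):
--     counts = {}
--     for value in seqs.values():
--         for i in range(len(value)):
--             snip = value[i:i + n]
--             if len(snip) == n:
--                 counts[snip] = counts.get(snip, 0) + 1
--     return {w: c for w, c in counts.items() if c >= 2}
-- ===== Notes on version B (the rewrite author's own statement) =====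
-- stated objective: simpler
-- what changed: Replaces A's two-phase quadratic algorithm (collect all windows into a list, then for each first occurrence rescan the whole remaining list to build up its count) by one counting pass that tallies every window in a dict while extracting it, then keeps the entries with count >= 2; the intermediate all_repeats list, the helper function and the nested rescan disappear.
import Mathlib
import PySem

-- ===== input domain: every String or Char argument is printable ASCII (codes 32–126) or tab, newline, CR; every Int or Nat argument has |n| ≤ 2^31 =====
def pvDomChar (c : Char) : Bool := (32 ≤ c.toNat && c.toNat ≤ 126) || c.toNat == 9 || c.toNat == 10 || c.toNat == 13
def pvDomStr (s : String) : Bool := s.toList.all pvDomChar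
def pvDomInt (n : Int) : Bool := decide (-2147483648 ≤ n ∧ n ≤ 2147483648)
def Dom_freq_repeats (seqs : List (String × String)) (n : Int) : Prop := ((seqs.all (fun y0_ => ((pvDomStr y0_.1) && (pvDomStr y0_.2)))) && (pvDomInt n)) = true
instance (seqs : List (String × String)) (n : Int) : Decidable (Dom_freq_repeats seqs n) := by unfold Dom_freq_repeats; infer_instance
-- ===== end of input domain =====

-- B replaces A's two-phase collect-then-rescan of the window list by one counting pass
-- over the windows followed by a filter keeping counts >= 2 (objective: simpler).

-- ===== PORT A =====
def find_repeats (seqs : List (String × String)) (n : Int) : List String :=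
  seqs.foldl (fun all_repeats kv =>
    let seq := kv.2
    let repeats := (PySem.List.pyRange 0 (PySem.Str.len seq) 1).foldl (fun repeats i =>
      let snip := PySem.Str.slice seq (some i) (some (i + n))
      if PySem.Str.len snip = n then repeats ++ [snip] else repeats) []
    repeats.foldl (fun all_repeats j => all_repeats ++ [j]) all_repeats) []

def freq_repeats (seqs : List (String × String)) (n : Int) : List (String × Int) :=
  let all_repeats := find_repeats seqs n
  let repeat_dict := (PySem.List.pyRange 0 (PySem.List.len all_repeats) 1).foldl (fun repeat_dict i =>
    if repeat_dict.contains (PySem.List.pyGetD all_repeats i "") = false then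
      (PySem.List.pyRange (i + 1) (PySem.List.len all_repeats) 1).foldl (fun repeat_dict j =>
        if PySem.List.pyGetD all_repeats i "" = PySem.List.pyGetD all_repeats j "" then
          if repeat_dict.contains (PySem.List.pyGetD all_repeats i "") = false then
            repeat_dict.insert (PySem.List.pyGetD all_repeats i "") 2
          else
            repeat_dict.insert (PySem.List.pyGetD all_repeats i "")
              (repeat_dict.getD (PySem.List.pyGetD all_repeats i "") 0 + 1)
        else repeat_dict) repeat_dict
    else repeat_dict) PySem.Dict.empty
  repeat_dict.items

-- ===== PORT B =====
def freq_repeats_alt (seqs : List (String × String)) (n : Int) : List (String × Int) :=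
  let counts := seqs.foldl (fun counts kv =>
    (PySem.List.pyRange 0 (PySem.Str.len kv.2) 1).foldl (fun counts i =>
      let snip := PySem.Str.slice kv.2 (some i) (some (i + n))
      if PySem.Str.len snip = n then counts.insert snip (counts.getD snip 0 + 1) else counts)
      counts) PySem.Dict.empty
  counts.items.filter (fun wc => decide (wc.2 ≥ 2))

-- ===== PRECONDITION & SPEC =====
def Spec_freq_repeats (seqs : List (String × String)) (n : Int) (out : List (String × Int)) : Prop := out = freq_repeats_alt seqs n
instance (seqs : List (String × String)) (n : Int) (out : List (String × Int)) : Decidable (Spec_freq_repeats seqs n out) := by unfold Spec_freq_repeats; infer_instance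

-- ===== CLAIM (what is proved, stated in full; the proofs are below) =====
def Claim_equal_freq_repeats : Prop := ∀ (seqs : List (String × String)) (n : Int), Dom_freq_repeats seqs n → Spec_freq_repeats seqs n (freq_repeats seqs n)

-- ===== LEMMAS AND PROOFS =====

-- the window cut at index i of string s, and the list of all full-length windows of s
def winsnip (s : String) (n i : Int) : String := PySem.Str.slice s (some i) (some (i + n))
def wins (s : String) (n : Int) : List String :=
  ((PySem.List.pyRange 0 (PySem.Str.len s) 1).filter
    (fun i => decide (PySem.Str.len (winsnip s n i) = n))).map (winsnip s n)
def allwins (seqs : List (String × String)) (n : Int) : List String :=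
  seqs.flatMap (fun kv => wins kv.2 n)

-- the association list A's dict holds once every window whose first occurrence lies in P has been processed
def aItems (L P : List String) : List (String × Int) :=
  ((PySem.Set.ofList P).map (fun k => (k, (L.count k : Int)))).filter (fun wc => decide (wc.2 ≥ 2))

-- the state step of A's inner scan at fixed witness w, as a function of the scanned element
def innerf (w : String) (d : PySem.Dict String Int) (x : String) : PySem.Dict String Int :=
  if w = x then
    if d.contains w = false then d.insert w 2 else d.insert w (d.getD w 0 + 1)
  else d

-- A's outer loop body over the window list L
def abody (L : List String) (d : PySem.Dict String Int) (i : Int) : PySem.Dict String Int :=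
  if d.contains (PySem.List.pyGetD L i "") = false then
    (PySem.List.pyRange (i + 1) (PySem.List.len L) 1).foldl (fun d j =>
      if PySem.List.pyGetD L i "" = PySem.List.pyGetD L j "" then
        if d.contains (PySem.List.pyGetD L i "") = false then
          d.insert (PySem.List.pyGetD L i "") 2
        else
          d.insert (PySem.List.pyGetD L i "") (d.getD (PySem.List.pyGetD L i "") 0 + 1)
      else d) d
  else d

-- keys and membership facts about the dict state aItems

lemma find_repeats_eq (seqs : List (String × String)) (n : Int) :
    find_repeats seqs n = allwins seqs n := by
  unfold find_repeats allwins
  rw [show (fun (all_repeats : List String) (kv : String × String) =>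
      let seq := kv.2
      let repeats := (PySem.List.pyRange 0 (PySem.Str.len seq) 1).foldl (fun repeats i =>
        let snip := PySem.Str.slice seq (some i) (some (i + n))
        if PySem.Str.len snip = n then repeats ++ [snip] else repeats) []
      repeats.foldl (fun all_repeats j => all_repeats ++ [j]) all_repeats)
    = (fun all_repeats kv => all_repeats ++ wins kv.2 n) from ?_,
    PySem.List.foldl_append_eq_flatMap, List.nil_append]
  funext all kv
  show ((PySem.List.pyRange 0 (PySem.Str.len kv.2) 1).foldl (fun repeats i =>
      if PySem.Str.len (winsnip kv.2 n i) = n then repeats ++ [winsnip kv.2 n i] else repeats) []).foldl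
        (fun all_repeats j => all_repeats ++ [j]) all = all ++ wins kv.2 n
  rw [PySem.List.foldl_append_ite (fun i => PySem.Str.len (winsnip kv.2 n i) = n) (winsnip kv.2 n),
    PySem.List.foldl_append_singleton_eq_self, List.nil_append, wins]

lemma counts_eq (seqs : List (String × String)) (n : Int) :
    seqs.foldl (fun counts kv =>
      (PySem.List.pyRange 0 (PySem.Str.len kv.2) 1).foldl (fun counts i =>
        if PySem.Str.len (PySem.Str.slice kv.2 (some i) (some (i + n))) = n then
          counts.insert (PySem.Str.slice kv.2 (some i) (some (i + n)))
            (counts.getD (PySem.Str.slice kv.2 (some i) (some (i + n))) 0 + 1)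
        else counts) counts) PySem.Dict.empty
      = PySem.Dict.counter (allwins seqs n) := by
  rw [← PySem.Dict.foldl_insert_getD_add_one_eq_counter, allwins, List.foldl_flatMap]
  apply PySem.List.foldl_congr_mem
  intro d kv _
  show (PySem.List.pyRange 0 (PySem.Str.len kv.2) 1).foldl (fun counts i =>
      if PySem.Str.len (winsnip kv.2 n i) = n then
        counts.insert (winsnip kv.2 n i) (counts.getD (winsnip kv.2 n i) 0 + 1)
      else counts) d
    = (wins kv.2 n).foldl (fun d x => d.insert x (d.getD x 0 + 1)) d
  rw [PySem.List.foldl_ite_eq_foldl_filter, wins, List.foldl_map]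

lemma contains_mk_append (pref : List (String × Int)) (w : String) (v : Int) :
    (PySem.Dict.mk (pref ++ [(w, v)])).contains w = true := by
  rw [PySem.Dict.contains_eq_decide_mem_keys]
  simp [PySem.Dict.keys_mk]

lemma contains_mk_not (pref : List (String × Int)) (w : String) (hw : ∀ p ∈ pref, p.1 ≠ w) :
    (PySem.Dict.mk pref).contains w = false := by
  rw [PySem.Dict.contains_eq_decide_mem_keys]
  simp only [PySem.Dict.keys_mk, decide_eq_false_iff_not, List.mem_map]
  rintro ⟨p, hp, hpw⟩
  exact hw p hp hpw

lemma map_keep (w : String) (v' : Int) (pref : List (String × Int)) (hw : ∀ p ∈ pref, p.1 ≠ w) :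
    pref.map (fun p => if (p.1 == w) = true then (w, v') else p) = pref := by
  conv_rhs => rw [← List.map_id pref]
  apply List.map_congr_left
  intro p hp
  simp [hw p hp]

lemma nodup_keys_mk_append (pref : List (String × Int)) (w : String) (v : Int)
    (hnd : (pref.map Prod.fst).Nodup) (hw : ∀ p ∈ pref, p.1 ≠ w) :
    (PySem.Dict.mk (pref ++ [(w, v)])).keys.Nodup := by
  rw [PySem.Dict.keys_mk, List.map_append, List.nodup_append]
  refine ⟨hnd, by simp, ?_⟩
  intro a ha b hb
  simp only [List.mem_map] at ha
  obtain ⟨p, hp, hpa⟩ := ha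
  simp only [List.map_cons, List.map_nil, List.mem_singleton] at hb
  subst hb
  exact fun h => hw p hp (hpa ▸ h ▸ rfl)

lemma insert_mk_append (pref : List (String × Int)) (w : String) (v v' : Int)
    (hw : ∀ p ∈ pref, p.1 ≠ w) :
    (PySem.Dict.mk (pref ++ [(w, v)])).insert w v' = PySem.Dict.mk (pref ++ [(w, v')]) := by
  apply PySem.Dict.ext
  rw [PySem.Dict.items_insert_of_contains _ _ (contains_mk_append pref w v)]
  show (pref ++ [(w, v)]).map _ = _
  rw [List.map_append, map_keep w v' pref hw]
  simp

lemma inner_run (w : String) :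
    ∀ (T : List String) (v : Int) (pref : List (String × Int)),
      (pref.map Prod.fst).Nodup → (∀ p ∈ pref, p.1 ≠ w) →
      T.foldl (innerf w) (PySem.Dict.mk (pref ++ [(w, v)]))
        = PySem.Dict.mk (pref ++ [(w, v + (T.count w : Int))]) := by
  intro T
  induction T with
  | nil => intro v pref _ _; simp
  | cons x T ih =>
    intro v pref hnd hw
    rw [List.foldl_cons]
    by_cases hx : w = x
    · subst hx
      have hg : (PySem.Dict.mk (pref ++ [(w, v)])).getD w 0 = v :=
        PySem.Dict.getD_of_mem_items _ (by simp) (nodup_keys_mk_append pref w v hnd hw) 0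
      rw [show innerf w (PySem.Dict.mk (pref ++ [(w, v)])) w = PySem.Dict.mk (pref ++ [(w, v + 1)]) from by
          simp only [innerf, contains_mk_append, Bool.true_eq_false, if_false, hg]
          exact insert_mk_append pref w v (v + 1) hw,
        ih (v + 1) pref hnd hw, List.count_cons_self]
      push_cast
      ring_nf
    · rw [show innerf w (PySem.Dict.mk (pref ++ [(w, v)])) x = PySem.Dict.mk (pref ++ [(w, v)]) from by
          simp [innerf, hx],
        ih v pref hnd hw, List.count_cons_of_ne (fun h => hx h.symm)]

lemma inner_go (w : String) :
    ∀ (T : List String) (pref : List (String × Int)),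
      (pref.map Prod.fst).Nodup → (∀ p ∈ pref, p.1 ≠ w) →
      T.foldl (innerf w) (PySem.Dict.mk pref)
        = if T.count w = 0 then PySem.Dict.mk pref
          else PySem.Dict.mk (pref ++ [(w, 1 + (T.count w : Int))]) := by
  intro T
  induction T with
  | nil => intro pref _ _; simp
  | cons x T ih =>
    intro pref hnd hw
    rw [List.foldl_cons]
    by_cases hx : w = x
    · subst hx
      rw [show innerf w (PySem.Dict.mk pref) w = PySem.Dict.mk (pref ++ [(w, 2)]) from by
          rw [show innerf w (PySem.Dict.mk pref) w = (PySem.Dict.mk pref).insert w 2 from by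
            simp [innerf, contains_mk_not pref w hw]]
          exact PySem.Dict.ext (PySem.Dict.items_insert_of_not_contains _ _ (contains_mk_not pref w hw)),
        inner_run w T 2 pref hnd hw, List.count_cons_self, if_neg (by omega)]
      push_cast
      ring_nf
    · rw [show innerf w (PySem.Dict.mk pref) x = PySem.Dict.mk pref from by simp [innerf, hx],
        ih pref hnd hw, List.count_cons_of_ne (fun h => hx h.symm)]

lemma keys_aItems (L P : List String) :
    (aItems L P).map Prod.fst = (PySem.Set.ofList P).filter (fun k => decide ((L.count k : Int) ≥ 2)) := by
  rw [aItems, List.filter_map, List.map_map]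
  simp [Function.comp_def]

lemma nodup_keys_aItems (L P : List String) : ((aItems L P).map Prod.fst).Nodup := by
  rw [keys_aItems]
  exact (PySem.Set.nodup_ofList P).filter _

lemma fst_mem_aItems (L P : List String) (p : String × Int) (hp : p ∈ aItems L P) : p.1 ∈ P := by
  rw [aItems] at hp
  obtain ⟨k, hk, rfl⟩ := List.mem_map.mp (List.mem_of_mem_filter hp)
  exact (PySem.Set.mem_ofList P _).mp hk

lemma contains_aItems (L P : List String) (x : String) :
    (PySem.Dict.mk (aItems L P)).contains x
      = (decide (x ∈ P) && decide ((L.count x : Int) ≥ 2)) := by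
  rw [PySem.Dict.contains_eq_decide_mem_keys]
  show decide (x ∈ (PySem.Dict.mk (aItems L P)).items.map Prod.fst) = _
  rw [show (PySem.Dict.mk (aItems L P)).items = aItems L P from rfl, keys_aItems]
  simp [PySem.Set.mem_ofList, List.mem_filter]

lemma aItems_snoc_mem (L P : List String) (x : String) (hx : x ∈ P) :
    aItems L (P ++ [x]) = aItems L P := by
  rw [aItems, PySem.Set.ofList_append_singleton, PySem.Set.add_of_mem ((PySem.Set.mem_ofList P x).mpr hx), ← aItems]

lemma aItems_snoc_low (L P : List String) (x : String) (hx : x ∉ P)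
    (h2 : ¬ ((L.count x : Int) ≥ 2)) : aItems L (P ++ [x]) = aItems L P := by
  rw [aItems, PySem.Set.ofList_append_singleton, PySem.Set.add_of_not_mem (fun h => hx ((PySem.Set.mem_ofList P x).mp h)),
    List.map_append, List.filter_append]
  simp only [List.map_cons, List.map_nil, List.filter_cons, decide_eq_true_eq, h2, if_false]
  simp [aItems]

lemma aItems_snoc_hi (L P : List String) (x : String) (hx : x ∉ P)
    (h2 : (L.count x : Int) ≥ 2) : aItems L (P ++ [x]) = aItems L P ++ [(x, (L.count x : Int))] := by
  rw [aItems, PySem.Set.ofList_append_singleton, PySem.Set.add_of_not_mem (fun h => hx ((PySem.Set.mem_ofList P x).mp h)),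
    List.map_append, List.filter_append]
  simp only [List.map_cons, List.map_nil, List.filter_cons, decide_eq_true_eq, h2, if_true]
  simp [aItems]


lemma outer_loop (L : List String) : ∀ (S P : List String), L = P ++ S →
    (PySem.List.pyRange (P.length : Int) (L.length : Int) 1).foldl (abody L)
        (PySem.Dict.mk (aItems L P))
      = PySem.Dict.mk (aItems L L) := by
  intro S
  induction S with
  | nil =>
    intro P hL
    have hP : P = L := by simpa using hL.symm
    subst hP
    rw [PySem.List.pyRange_one_eq_nil (le_refl _)]
    rfl
  | cons x S ih =>
    intro P hL
    have hlen : (P.length : Int) < (L.length : Int) := by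
      subst hL; simp
    rw [PySem.List.pyRange_one_cons hlen, List.foldl_cons]
    have hget : PySem.List.pyGetD L (P.length : Int) "" = x := by
      rw [PySem.List.pyGetD_natCast, hL]
      simp [List.getD]
    have hcnt : L.count x = P.count x + 1 + S.count x := by
      rw [hL, List.count_append, List.count_cons_self]; omega
    have hstep : abody L (PySem.Dict.mk (aItems L P)) (P.length : Int)
        = PySem.Dict.mk (aItems L (P ++ [x])) := by
      rw [abody, hget, contains_aItems]
      by_cases hxP : x ∈ P
      · have h2 : (L.count x : Int) ≥ 2 := by
          have h1 : 1 ≤ P.count x := List.one_le_count_iff.mpr hxP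
          rw [hcnt]; push_cast; omega
        rw [if_neg (by simp [hxP, h2]), aItems_snoc_mem L P x hxP]
      · have h0 : P.count x = 0 := List.count_eq_zero.mpr hxP
        rw [if_pos (by simp [hxP])]
        have hlenL : PySem.List.len L = (L.length : Int) := by simp
        rw [hlenL]
        rw [show (fun (d : PySem.Dict String Int) j =>
            if x = PySem.List.pyGetD L j "" then
              if d.contains x = false then d.insert x 2
              else d.insert x (d.getD x 0 + 1)
            else d) = (fun d j => innerf x d (PySem.List.pyGetD L j "")) from rfl]
        rw [PySem.List.foldl_pyRange_pyGetD' L "" (innerf x) _ (by positivity)]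
        have hdrop : L.drop ((P.length : Int) + 1).toNat = S := by
          rw [show ((P.length : Int) + 1).toNat = P.length + 1 from by omega, hL,
            show P.length + 1 = (P ++ [x]).length from by simp,
            show P ++ x :: S = (P ++ [x]) ++ S from by simp]
          exact List.drop_left
        rw [hdrop, inner_go x S (aItems L P) (nodup_keys_aItems L P)
            (fun p hp hpx => hxP (hpx ▸ fst_mem_aItems L P p hp))]
        by_cases hS : S.count x = 0
        · rw [if_pos hS, aItems_snoc_low L P x hxP (by rw [hcnt, h0, hS]; norm_num)]
        · rw [if_neg hS, aItems_snoc_hi L P x hxP (by rw [hcnt, h0]; have h1 : 1 ≤ S.count x := Nat.one_le_iff_ne_zero.mpr hS; push_cast; omega)]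
          rw [hcnt, h0]
          push_cast
          ring_nf
    rw [hstep, show (P.length : Int) + 1 = ((P ++ [x]).length : Int) from by
        simp only [List.length_append, List.length_cons, List.length_nil]; push_cast; ring_nf,
      ih (P ++ [x]) (by simp [hL])]

-- ===== VERDICT (by name: the statement is the Claim_ definition above) =====
theorem freq_repeats_spec : Claim_equal_freq_repeats := by
  intro seqs n _hdom
  unfold Spec_freq_repeats freq_repeats freq_repeats_alt
  show ((PySem.List.pyRange 0 (PySem.List.len (find_repeats seqs n)) 1).foldl
      (abody (find_repeats seqs n)) PySem.Dict.empty).items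
    = (seqs.foldl (fun counts kv =>
        (PySem.List.pyRange 0 (PySem.Str.len kv.2) 1).foldl (fun counts i =>
          if PySem.Str.len (PySem.Str.slice kv.2 (some i) (some (i + n))) = n then
            counts.insert (PySem.Str.slice kv.2 (some i) (some (i + n)))
              (counts.getD (PySem.Str.slice kv.2 (some i) (some (i + n))) 0 + 1)
          else counts) counts) PySem.Dict.empty).items.filter (fun wc => decide (wc.2 ≥ 2))
  rw [counts_eq, find_repeats_eq]
  have h := outer_loop (allwins seqs n) (allwins seqs n) [] rfl
  rw [show (PySem.Dict.mk (aItems (allwins seqs n) []) : PySem.Dict String Int)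
      = PySem.Dict.empty from rfl] at h
  simp only [List.length_nil, Nat.cast_zero] at h
  simp only [PySem.List.len_eq]
  rw [h]
  show aItems (allwins seqs n) (allwins seqs n) = _
  rw [PySem.Dict.items_counter]
  rfl
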